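-- pv_equiv track=rewrite | github.com/0187773933/AcademicResearchTools | SCRIPTS/GithubCrawl/GitHubCrawl.py | choose_candidate_files
-- ===== SOURCE A (Python) =====
-- from typing import Dict, List, Optional, Set, Tuple
--
-- MAX_FILES_TO_CHECK = 25
--
-- def choose_candidate_files(paths: List[str]) -> List[str]:
-- 	boosted = []
-- 	fallback = []
--
-- 	for path in paths:
-- 		low = path.lower()
-- 		if any(k in low for k in [
-- 			"decode", "decoder", "classif", "mvpa", "searchlight",
-- 			"train", "model", "fmri", "bold", "voxel", "nilearn", "brainiak"
-- 		]):
-- 			boosted.append(path)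
-- 		else:
-- 			fallback.append(path)
--
-- 	selected = boosted[:MAX_FILES_TO_CHECK]
-- 	if len(selected) < MAX_FILES_TO_CHECK:
-- 		needed = MAX_FILES_TO_CHECK - len(selected)
-- 		selected.extend(fallback[:needed])
--
-- 	return selected
-- ===== SOURCE B (Python) =====
-- MAX_FILES_TO_CHECK = 25
--
-- KEYWORDS = [
--     "decode", "decoder", "classif", "mvpa", "searchlight",
--     "train", "model", "fmri", "bold", "voxel", "nilearn", "brainiak"
-- ]
--
--
-- def choose_candidate_files(paths):
--     def priority(path):
--         low = path.lower()
--         return 0 if any(k in low for k in KEYWORDS) else 1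
--     return sorted(paths, key=priority)[:MAX_FILES_TO_CHECK]
-- ===== Notes on version B (the rewrite author's own statement) =====
-- stated objective: simpler
-- what changed: Replaces the partition-into-two-lists-then-refill logic with a single stable sort by a 0/1 priority key followed by one truncation to 25.
import Mathlib
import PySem

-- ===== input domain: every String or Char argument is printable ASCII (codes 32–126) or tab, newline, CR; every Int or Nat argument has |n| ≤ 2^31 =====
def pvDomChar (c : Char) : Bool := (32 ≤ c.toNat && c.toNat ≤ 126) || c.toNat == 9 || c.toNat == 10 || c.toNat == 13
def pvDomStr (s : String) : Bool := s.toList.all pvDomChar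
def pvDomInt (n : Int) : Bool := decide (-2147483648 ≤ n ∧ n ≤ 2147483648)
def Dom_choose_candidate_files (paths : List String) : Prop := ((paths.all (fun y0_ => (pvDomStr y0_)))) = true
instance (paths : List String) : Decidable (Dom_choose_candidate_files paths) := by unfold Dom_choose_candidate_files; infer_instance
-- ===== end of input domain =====

-- B replaces A's partition-into-two-lists-then-refill with one stable sort by a 0/1 priority
-- key followed by a single truncation to 25 (objective: simpler; same observable behaviour).

-- ===== PORT A =====
def pvKeywords : List String :=
  ["decode", "decoder", "classif", "mvpa", "searchlight",
   "train", "model", "fmri", "bold", "voxel", "nilearn", "brainiak"]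

-- any(k in low for k in [...]) with low = path.lower()
def pvMatches (path : String) : Bool :=
  pvKeywords.any (fun k => PySem.Str.isIn k (PySem.Str.lower path))

def choose_candidate_files (paths : List String) : List String :=
  -- the for-loop appending to boosted / fallback, as a fold over the pair of accumulators
  let bf := paths.foldl
    (fun (acc : List String × List String) path =>
      if pvMatches path then (acc.1 ++ [path], acc.2) else (acc.1, acc.2 ++ [path]))
    ([], [])
  let selected := PySem.List.slice bf.1 none (some 25)          -- boosted[:25]
  if PySem.List.len selected < 25 then
    selected ++ PySem.List.slice bf.2 none (some (25 - PySem.List.len selected))  -- fallback[:needed]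
  else
    selected

-- ===== PORT B =====
-- priority(path): 0 if any keyword occurs in path.lower(), else 1
def pvPriority (path : String) : Int :=
  if pvKeywords.any (fun k => PySem.Str.isIn k (PySem.Str.lower path)) then 0 else 1

def choose_candidate_files_alt (paths : List String) : List String :=
  PySem.List.slice (PySem.List.sorted paths (fun p => pvPriority p)) none (some 25)

-- ===== PRECONDITION & SPEC =====
def Spec_choose_candidate_files (paths : List String) (out : List String) : Prop := out = choose_candidate_files_alt paths
instance (paths : List String) (out : List String) : Decidable (Spec_choose_candidate_files paths out) := by unfold Spec_choose_candidate_files; infer_instance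

-- ===== CLAIM (what is proved, stated in full; the proofs are below) =====
def Claim_equal_choose_candidate_files : Prop := ∀ (paths : List String), Dom_choose_candidate_files paths → Spec_choose_candidate_files paths (choose_candidate_files paths)

-- ===== LEMMAS AND PROOFS =====

-- insertBy passes over a prefix it does not go before
theorem pv_insertBy_append_left {α : Type} (bef : α → α → Bool) (x : α) (A B : List α)
    (h : ∀ a ∈ A, bef x a = false) :
    PySem.List.insertBy bef x (A ++ B) = A ++ PySem.List.insertBy bef x B := by
  induction A with
  | nil => simp
  | cons a A ih =>
    have ha : bef x a = false := h a (by simp)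
    simp only [List.cons_append, PySem.List.insertBy, ha, Bool.false_eq_true, if_false]
    rw [ih (fun a ha' => h a (by simp [ha']))]

-- a stable insertion sort by the two-valued key {0,1} is: matches first, the rest after,
-- each group in original order
theorem pv_foldl_insertBy_two_valued {α : Type} (m : α → Bool) (xs A B : List α)
    (hA : ∀ a ∈ A, m a = true) (hB : ∀ b ∈ B, m b = false) :
    xs.foldl (fun acc x =>
        PySem.List.insertBy
          (fun a b => decide ((if m a then (0 : Int) else 1) < (if m b then (0 : Int) else 1)))
          x acc) (A ++ B)
      = (A ++ xs.filter m) ++ (B ++ xs.filter (fun x => !m x)) := by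
  induction xs generalizing A B with
  | nil => simp
  | cons x xs ih =>
    rw [List.foldl_cons]
    by_cases hm : m x
    · have hstep :
          PySem.List.insertBy
            (fun a b => decide ((if m a then (0 : Int) else 1) < (if m b then (0 : Int) else 1)))
            x (A ++ B) = (A ++ [x]) ++ B := by
        rw [pv_insertBy_append_left _ _ _ _ (fun a haA => by simp [hm, hA a haA])]
        cases B with
        | nil => simp [PySem.List.insertBy]
        | cons b B' =>
          have hb : m b = false := hB b (by simp)
          simp [PySem.List.insertBy, hm, hb]
      have hA' : ∀ a ∈ A ++ [x], m a = true := by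
        intro a ha
        rcases List.mem_append.1 ha with h' | h'
        · exact hA a h'
        · simp at h'; subst h'; exact hm
      rw [hstep, ih (A ++ [x]) B hA' hB]
      simp [hm, List.append_assoc]
    · have hstep :
          PySem.List.insertBy
            (fun a b => decide ((if m a then (0 : Int) else 1) < (if m b then (0 : Int) else 1)))
            x (A ++ B) = A ++ (B ++ [x]) := by
        rw [PySem.List.insertBy_of_forall_not_before]
        · simp
        · intro y _; by_cases hy : m y <;> simp [hm, hy]
      have hB' : ∀ b ∈ B ++ [x], m b = false := by
        intro b hb
        rcases List.mem_append.1 hb with h' | h'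
        · exact hB b h'
        · simp at h'; subst h'; simpa using hm
      rw [hstep, ih A (B ++ [x]) hA hB']
      simp [hm, List.append_assoc]

-- sorted(paths, key=priority) = matches ++ non-matches
theorem pv_sorted_priority (paths : List String) :
    PySem.List.sorted paths (fun p => pvPriority p)
      = paths.filter pvMatches ++ paths.filter (fun p => !pvMatches p) := by
  rw [PySem.List.sorted_eq_foldl_insertBy]
  have hbef : (fun (a b : String) => decide (pvPriority a < pvPriority b))
      = fun a b => decide ((if pvMatches a then (0 : Int) else 1) < (if pvMatches b then (0 : Int) else 1)) := by
    funext a b; simp [pvPriority, pvMatches]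
  rw [hbef]
  simpa using pv_foldl_insertBy_two_valued pvMatches paths [] []
    (by intro a h; simp at h) (by intro b h; simp at h)

-- A's partition loop computes the two filters
theorem pv_partition (paths : List String) :
    paths.foldl
      (fun (acc : List String × List String) path =>
        if pvMatches path then (acc.1 ++ [path], acc.2) else (acc.1, acc.2 ++ [path]))
      ([], [])
      = (paths.filter pvMatches, paths.filter (fun p => !pvMatches p)) := by
  have hfg : (fun (acc : List String × List String) path =>
        if pvMatches path then (acc.1 ++ [path], acc.2) else (acc.1, acc.2 ++ [path]))
      = fun acc path =>
        (if pvMatches path then acc.1 ++ [path] else acc.1,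
         if !pvMatches path then acc.2 ++ [path] else acc.2) := by
    funext acc path; by_cases h : pvMatches path <;> simp [h]
  rw [hfg, PySem.List.foldl_prod_mk
        (f := fun (a : List String) path => if pvMatches path then a ++ [path] else a)
        (g := fun (a : List String) path => if !pvMatches path then a ++ [path] else a)]
  rw [PySem.List.foldl_append_if_eq_filter, PySem.List.foldl_append_if_eq_filter]
  simp

-- ===== VERDICT (by name: the statement is the Claim_ definition above) =====
theorem choose_candidate_files_spec : Claim_equal_choose_candidate_files := by
  intro paths _
  unfold Spec_choose_candidate_files choose_candidate_files choose_candidate_files_alt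
  rw [pv_partition, pv_sorted_priority]
  set f0 := paths.filter pvMatches with hf0
  set f1 := paths.filter (fun p => !pvMatches p) with hf1
  dsimp only
  rw [PySem.List.slice_to f0 (by norm_num), PySem.List.slice_to (f0 ++ f1) (by norm_num)]
  have h25 : (25 : Int).toNat = 25 := rfl
  simp only [h25, List.take_append]
  have hlen : PySem.List.len (f0.take 25) = ((min 25 f0.length : Nat) : Int) := by
    simp [PySem.List.len_eq]
  by_cases hlt : f0.length < 25
  · have hcond : PySem.List.len (f0.take 25) < 25 := by rw [hlen]; omega
    rw [if_pos hcond, hlen]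
    have htake : f0.take 25 = f0 := List.take_of_length_le (by omega)
    have hmin : (min 25 f0.length : Nat) = f0.length := by omega
    rw [hmin, PySem.List.slice_to f1 (by omega)]
    rw [htake]
    congr 1
    congr 1
    omega
  · have hcond : ¬ PySem.List.len (f0.take 25) < 25 := by rw [hlen]; omega
    rw [if_neg hcond]
    have h0 : 25 - f0.length = 0 := by omega
    simp [h0]
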